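-- pv_equiv track=rewrite | github.com/KirbysGit/taylor.io | backend/generator/builders/tagline.py | _tagline_apply_bold_and_dots
-- ===== SOURCE A (Python) =====
-- from typing import Any, Dict, List, Tuple
--
-- TAGLINE_INTERPUNCT = "\u00b7"
--
-- def _tagline_apply_bold_and_dots(text: str, italic: bool) -> List[Tuple[str, bool, bool]]:
--     """
--     Within one italic/non-italic segment: split on ``**`` to mark bold runs; remap stray ``*`` to ``TAGLINE_INTERPUNCT``.
--
--     - Odd number of ``**``-delimited parts → even **index segments are normal, odd are **bold**.
--     - Even number of splits (unclosed ``**``) → treat whole string as plain: no bold toggles, still swap ``*`` for interpunct.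
--     """
--     parts = text.split("**")
--     if len(parts) % 2 == 0:
--         t = text.replace("*", TAGLINE_INTERPUNCT)
--         return [(t, False, italic)] if t else []
--     runs: List[Tuple[str, bool, bool]] = []
--     for idx, p in enumerate(parts):
--         bold = idx % 2 == 1
--         t = p.replace("*", TAGLINE_INTERPUNCT)
--         if t:
--             runs.append((t, bold, italic))
--     return runs
-- ===== SOURCE B (Python) =====
-- TAGLINE_INTERPUNCT = "\u00b7"
--
-- def _tagline_apply_bold_and_dots(text, italic):
--     # Decide plain-vs-bold globally by '**' parity, then single left-to-right
--     # scan with a buffer and a bold toggle (no split list, no parity indexing).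
--     if text.count("**") % 2 == 1:
--         t = text.replace("*", TAGLINE_INTERPUNCT)
--         return [(t, False, italic)] if t else []
--     runs = []
--     buf = []
--     bold = False
--     i = 0
--     n = len(text)
--     while i < n:
--         if text.startswith("**", i):
--             if buf:
--                 runs.append(("".join(buf), bold, italic))
--             buf = []
--             bold = not bold
--             i += 2
--         elif text[i] == "*":
--             buf.append(TAGLINE_INTERPUNCT)
--             i += 1
--         else:
--             buf.append(text[i])
--             i += 1
--     if buf:
--         runs.append(("".join(buf), bold, italic))
--     return runs
-- ===== Notes on version B (the rewrite author's own statement) =====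
-- stated objective: alternative
-- what changed: B decides plain-vs-bold up front from the parity of '**' occurrences and then does a single character scan with a running buffer and a bold toggle, instead of building the '**'-split list and indexing it by parity with per-part replace passes.
import Mathlib
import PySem

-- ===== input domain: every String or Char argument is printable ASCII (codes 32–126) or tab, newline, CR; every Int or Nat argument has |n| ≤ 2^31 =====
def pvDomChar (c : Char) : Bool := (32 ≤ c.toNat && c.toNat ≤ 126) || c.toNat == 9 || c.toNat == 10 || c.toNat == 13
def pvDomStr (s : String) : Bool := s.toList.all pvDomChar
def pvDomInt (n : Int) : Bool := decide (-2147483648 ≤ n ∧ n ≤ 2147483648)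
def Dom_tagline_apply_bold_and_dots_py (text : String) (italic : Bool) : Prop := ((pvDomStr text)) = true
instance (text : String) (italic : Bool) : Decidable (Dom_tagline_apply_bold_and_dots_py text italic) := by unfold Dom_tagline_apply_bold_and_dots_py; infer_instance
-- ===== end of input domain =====

-- B replaces A's split-by-"**" + parity indexing by a "**"-count parity check followed by
-- one buffered scan with a bold toggle; same cost, different structure (objective: alternative).

-- ===== PORT A =====
def TAGLINE_INTERPUNCT : String := "\u00b7"

def tagline_apply_bold_and_dots_py (text : String) (italic : Bool) : List (String × Bool × Bool) :=
  let parts := PySem.Chars.splitOn text.toList "**".toList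
  if parts.length % 2 == 0 then
    let t := PySem.Str.replace text "*" TAGLINE_INTERPUNCT
    if t ≠ "" then [(t, false, italic)] else []
  else
    (PySem.List.enumerate parts 0).foldl (fun runs ip =>
      let bold : Bool := PySem.Int.mod ip.1 2 == 1
      let t := String.ofList (PySem.Chars.replace ip.2 "*".toList TAGLINE_INTERPUNCT.toList)
      if t ≠ "" then runs ++ [(t, bold, italic)] else runs) []

-- ===== PORT B =====
-- the while loop of Source B: l = text[i:], buf = pending run text, bold = toggle, runs = output so far
def pvAltScan (italic : Bool) (l buf : List Char) (bold : Bool)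
    (runs : List (String × Bool × Bool)) : List (String × Bool × Bool) :=
  match l with
  | [] => if buf ≠ [] then runs ++ [(String.ofList buf, bold, italic)] else runs
  | c :: rest =>
    if "**".toList.isPrefixOf (c :: rest) then
      pvAltScan italic ((c :: rest).drop 2) [] (!bold)
        (if buf ≠ [] then runs ++ [(String.ofList buf, bold, italic)] else runs)
    else if c = '*' then pvAltScan italic rest (buf ++ ['\u00b7']) bold runs
    else pvAltScan italic rest (buf ++ [c]) bold runs
termination_by l.length
decreasing_by all_goals (simp; try omega)

def tagline_apply_bold_and_dots_py_alt (text : String) (italic : Bool) : List (String × Bool × Bool) :=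
  if PySem.Str.count text "**" % 2 == 1 then
    let t := PySem.Str.replace text "*" TAGLINE_INTERPUNCT
    if t ≠ "" then [(t, false, italic)] else []
  else
    pvAltScan italic text.toList [] false []

-- ===== PRECONDITION & SPEC =====
def Spec_tagline_apply_bold_and_dots_py (text : String) (italic : Bool) (out : List (String × Bool × Bool)) : Prop := out = tagline_apply_bold_and_dots_py_alt text italic
instance (text : String) (italic : Bool) (out : List (String × Bool × Bool)) : Decidable (Spec_tagline_apply_bold_and_dots_py text italic out) := by unfold Spec_tagline_apply_bold_and_dots_py; infer_instance

-- ===== CLAIM (what is proved, stated in full; the proofs are below) =====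
def Claim_equal_tagline_apply_bold_and_dots_py : Prop := ∀ (text : String) (italic : Bool), Dom_tagline_apply_bold_and_dots_py text italic → Spec_tagline_apply_bold_and_dots_py text italic (tagline_apply_bold_and_dots_py text italic)

-- ===== LEMMAS AND PROOFS =====

-- structural split of a char list on "**" (left-to-right, non-overlapping)
def pvParts (l : List Char) : List (List Char) :=
  match l with
  | [] => [[]]
  | c :: rest =>
    if "**".toList.isPrefixOf (c :: rest) then [] :: pvParts ((c :: rest).drop 2)
    else (pvParts rest).modifyHead (c :: ·)
termination_by l.length
decreasing_by all_goals (simp; try omega)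

-- number of non-overlapping "**" occurrences
def pvCnt (l : List Char) : Nat :=
  match l with
  | [] => 0
  | c :: rest =>
    if "**".toList.isPrefixOf (c :: rest) then pvCnt ((c :: rest).drop 2) + 1
    else pvCnt rest
termination_by l.length
decreasing_by all_goals (simp; try omega)

def pvSub (c : Char) : Char := if c = '*' then '\u00b7' else c

-- the alternating run emitter both ports reduce to
def pvEmit (italic : Bool) : List (List Char) → List Char → Bool → List (String × Bool × Bool)
  | [], _, _ => []
  | p :: ps, buf, bold =>
      (if buf ++ p.map pvSub ≠ [] then [(String.ofList (buf ++ p.map pvSub), bold, italic)] else [])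
        ++ pvEmit italic ps [] (!bold)

theorem pvPrefix_iff (c : Char) (rest : List Char) :
    "**".toList.isPrefixOf (c :: rest) = true ↔ c = '*' ∧ ∃ r, rest = '*' :: r := by
  cases rest <;> simp [List.isPrefixOf] <;> aesop

theorem pvParts_nil : pvParts [] = [[]] := by rw [pvParts.eq_def]

theorem pvParts_ss (r : List Char) : pvParts ('*' :: '*' :: r) = [] :: pvParts r := by
  rw [pvParts.eq_def]
  simp [List.isPrefixOf]

theorem pvParts_cons (c : Char) (rest : List Char)
    (hp : "**".toList.isPrefixOf (c :: rest) = false) :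
    pvParts (c :: rest) = (pvParts rest).modifyHead (c :: ·) := by
  rw [pvParts.eq_def]
  simp only [hp, Bool.false_eq_true, if_false]

theorem pvCnt_nil : pvCnt [] = 0 := by rw [pvCnt.eq_def]

theorem pvCnt_ss (r : List Char) : pvCnt ('*' :: '*' :: r) = pvCnt r + 1 := by
  rw [pvCnt.eq_def]
  simp [List.isPrefixOf]

theorem pvCnt_cons (c : Char) (rest : List Char)
    (hp : "**".toList.isPrefixOf (c :: rest) = false) :
    pvCnt (c :: rest) = pvCnt rest := by
  rw [pvCnt.eq_def]
  simp only [hp, Bool.false_eq_true, if_false]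

theorem pvAltScan_nil (italic : Bool) (buf : List Char) (bold : Bool) (runs : List (String × Bool × Bool)) :
    pvAltScan italic [] buf bold runs
      = if buf ≠ [] then runs ++ [(String.ofList buf, bold, italic)] else runs := by
  rw [pvAltScan.eq_def]

theorem pvAltScan_ss (italic : Bool) (r buf : List Char) (bold : Bool) (runs : List (String × Bool × Bool)) :
    pvAltScan italic ('*' :: '*' :: r) buf bold runs
      = pvAltScan italic r [] (!bold)
          (if buf ≠ [] then runs ++ [(String.ofList buf, bold, italic)] else runs) := by
  rw [pvAltScan.eq_def]
  simp [List.isPrefixOf]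

theorem pvAltScan_cons (italic : Bool) (c : Char) (rest buf : List Char) (bold : Bool)
    (runs : List (String × Bool × Bool)) (hp : "**".toList.isPrefixOf (c :: rest) = false) :
    pvAltScan italic (c :: rest) buf bold runs
      = if c = '*' then pvAltScan italic rest (buf ++ ['\u00b7']) bold runs
        else pvAltScan italic rest (buf ++ [c]) bold runs := by
  rw [pvAltScan.eq_def]
  simp only [hp, Bool.false_eq_true, if_false]

theorem pvReplaceGo_star (l acc : List Char) (fuel : Nat) (h : l.length ≤ fuel) :
    PySem.Chars.replace.go ['*'] ['\u00b7'] fuel l acc = acc.reverse ++ l.map pvSub := by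
  induction l generalizing fuel acc with
  | nil => cases fuel <;> simp [PySem.Chars.replace.go]
  | cons c t ih =>
    cases fuel with
    | zero => simp at h
    | succ f =>
      simp only [List.length_cons, Nat.add_le_add_iff_right] at h
      by_cases hc : c = '*'
      · subst hc
        simp [PySem.Chars.replace.go, List.isPrefixOf, ih _ _ h, pvSub]
      · simp [PySem.Chars.replace.go, List.isPrefixOf, hc, ih _ _ h, pvSub]
        exact fun h => absurd h.symm hc

theorem pvReplace_star (l : List Char) :
    PySem.Chars.replace l ['*'] ['\u00b7'] = l.map pvSub := by
  simp [PySem.Chars.replace, pvReplaceGo_star l [] l.length le_rfl]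

theorem pvSplitGo_star (fuel : Nat) : ∀ (l cur : List Char) (acc : List (List Char)), l.length ≤ fuel →
    PySem.Chars.splitOn.go ['*','*'] fuel l cur acc
      = acc.reverse ++ (pvParts l).modifyHead (cur.reverse ++ ·) := by
  induction fuel with
  | zero =>
    intro l cur acc h
    have : l = [] := List.length_eq_zero_iff.mp (Nat.le_zero.mp h)
    subst this
    simp [PySem.Chars.splitOn.go, pvParts_nil, List.modifyHead]
  | succ f ih =>
    intro l cur acc h
    match l with
    | [] => simp [PySem.Chars.splitOn.go, pvParts_nil, List.modifyHead]
    | c :: rest =>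
      simp only [List.length_cons, Nat.add_le_add_iff_right] at h
      by_cases hp : "**".toList.isPrefixOf (c :: rest) = true
      · obtain ⟨rfl, r, rfl⟩ := (pvPrefix_iff _ _).mp hp
        simp only [PySem.Chars.splitOn.go]
        rw [if_pos (by simpa using hp)]
        rw [show List.drop (['*','*'] : List Char).length ('*' :: '*' :: r) = r from rfl]
        rw [ih _ _ _ (by simp at h ⊢; omega)]
        rw [pvParts_ss]
        cases hr : pvParts r <;> simp [hr, List.modifyHead]
      · have hp' : "**".toList.isPrefixOf (c :: rest) = false := Bool.eq_false_iff.mpr hp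
        simp only [PySem.Chars.splitOn.go]
        rw [if_neg (by simpa using hp)]
        rw [ih _ _ _ h]
        rw [pvParts_cons _ _ hp']
        cases hr : pvParts rest <;> simp [hr, List.modifyHead]

theorem pvSplit_star (l : List Char) :
    PySem.Chars.splitOn l ['*','*'] = pvParts l := by
  rw [PySem.Chars.splitOn, pvSplitGo_star (l.length + 1) l [] [] (Nat.le_succ _)]
  cases hr : pvParts l <;> simp [hr, List.modifyHead]

theorem pvCountGo_star (fuel : Nat) : ∀ (l : List Char) (acc : Nat), l.length ≤ fuel →
    PySem.Chars.count.go ['*','*'] fuel l acc = acc + pvCnt l := by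
  induction fuel with
  | zero =>
    intro l acc h
    have : l = [] := List.length_eq_zero_iff.mp (Nat.le_zero.mp h)
    subst this
    simp [PySem.Chars.count.go, pvCnt_nil]
  | succ f ih =>
    intro l acc h
    match l with
    | [] => simp [PySem.Chars.count.go, pvCnt_nil]
    | c :: rest =>
      simp only [List.length_cons, Nat.add_le_add_iff_right] at h
      by_cases hp : "**".toList.isPrefixOf (c :: rest) = true
      · obtain ⟨rfl, r, rfl⟩ := (pvPrefix_iff _ _).mp hp
        simp only [PySem.Chars.count.go]
        rw [if_pos (by simpa using hp)]
        rw [show List.drop (['*','*'] : List Char).length ('*' :: '*' :: r) = r from rfl]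
        rw [ih _ _ (by simp at h ⊢; omega)]
        rw [pvCnt_ss]
        omega
      · have hp' : "**".toList.isPrefixOf (c :: rest) = false := Bool.eq_false_iff.mpr hp
        simp only [PySem.Chars.count.go]
        rw [if_neg (by simpa using hp)]
        rw [ih _ _ h]
        rw [pvCnt_cons _ _ hp']

theorem pvCount_star (l : List Char) :
    PySem.Chars.count l ['*','*'] = pvCnt l := by
  rw [PySem.Chars.count]
  simp [pvCountGo_star l.length l 0 le_rfl]

theorem pvParts_length (l : List Char) : (pvParts l).length = pvCnt l + 1 := by
  fun_induction pvParts l with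
  | case1 => simp [pvParts_nil, pvCnt_nil]
  | case2 c rest hp ih =>
    obtain ⟨rfl, r, rfl⟩ := (pvPrefix_iff _ _).mp hp
    rw [show List.drop 2 ('*' :: '*' :: r) = r from rfl] at ih ⊢
    rw [pvCnt_ss]
    simp [ih]
  | case3 c rest hp ih =>
    have hp' : "**".toList.isPrefixOf (c :: rest) = false := Bool.eq_false_iff.mpr hp
    rw [pvCnt_cons _ _ hp']
    cases hr : pvParts rest <;> simp_all [List.modifyHead]

theorem pvEmit_modifyHead (italic : Bool) (c : Char) (ps : List (List Char)) (buf : List Char) (bold : Bool) :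
    pvEmit italic (ps.modifyHead (c :: ·)) buf bold = pvEmit italic ps (buf ++ [pvSub c]) bold := by
  cases ps <;> simp [pvEmit, List.modifyHead]

theorem pvAltScan_eq (italic : Bool) (l : List Char) : ∀ (buf : List Char) (bold : Bool) runs,
    pvAltScan italic l buf bold runs = runs ++ pvEmit italic (pvParts l) buf bold := by
  fun_induction pvParts l with
  | case1 =>
    intro buf bold runs
    rw [pvAltScan_nil]
    by_cases hb : buf = [] <;> simp [pvEmit, hb]
  | case2 c rest hp ih =>
    intro buf bold runs
    obtain ⟨rfl, r, rfl⟩ := (pvPrefix_iff _ _).mp hp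
    rw [show List.drop 2 ('*' :: '*' :: r) = r from rfl] at ih ⊢
    rw [pvAltScan_ss, ih]
    simp only [pvEmit]
    by_cases hb : buf = [] <;> simp [hb]
  | case3 c rest hp ih =>
    intro buf bold runs
    have hp' : "**".toList.isPrefixOf (c :: rest) = false := Bool.eq_false_iff.mpr hp
    rw [pvAltScan_cons _ _ _ _ _ _ hp', pvEmit_modifyHead]
    by_cases hc : c = '*'
    · subst hc
      rw [if_pos rfl, ih]
      rw [show pvSub '*' = '\u00b7' from rfl]
    · rw [if_neg hc, ih]
      rw [show pvSub c = c from by simp [pvSub, hc]]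

theorem pvMod_flip (s : Int) (h : 0 ≤ s) :
    (PySem.Int.mod (s + 1) 2 == 1) = !(PySem.Int.mod s 2 == 1) := by
  rw [PySem.Int.mod_eq_emod_of_pos (by norm_num), PySem.Int.mod_eq_emod_of_pos (by norm_num)]
  have h2 : (s + 1) % 2 = 1 - s % 2 := by omega
  rw [h2]
  rcases Int.emod_two_eq_zero_or_one s with h3 | h3 <;> simp [h3]

theorem pvAFold_eq (italic : Bool) (ps : List (List Char)) : ∀ (s : Int) (runs : List (String × Bool × Bool)), 0 ≤ s →
    (PySem.List.enumerate ps s).foldl (fun runs ip =>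
      let bold : Bool := PySem.Int.mod ip.1 2 == 1
      let t := String.ofList (PySem.Chars.replace ip.2 "*".toList TAGLINE_INTERPUNCT.toList)
      if t ≠ "" then runs ++ [(t, bold, italic)] else runs) runs
      = runs ++ pvEmit italic ps [] (PySem.Int.mod s 2 == 1) := by
  induction ps with
  | nil => intro s runs _; simp [pvEmit]
  | cons p ps ih =>
    intro s runs hs
    rw [PySem.List.enumerate_cons, List.foldl_cons]
    simp only
    rw [ih _ _ (by omega), pvMod_flip s hs]
    have hrep : PySem.Chars.replace p "*".toList TAGLINE_INTERPUNCT.toList = p.map pvSub := by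
      simpa [TAGLINE_INTERPUNCT] using pvReplace_star p
    rw [hrep, pvEmit]
    simp only [List.nil_append]
    by_cases hp : p.map pvSub = []
    · simp [hp]
    · have : String.ofList (p.map pvSub) ≠ "" := by
        intro hcon
        apply hp
        have := congrArg String.toList hcon
        simpa using this
      simp [hp, this]

-- ===== VERDICT (by name: the statement is the Claim_ definition above) =====
theorem tagline_apply_bold_and_dots_py_spec : Claim_equal_tagline_apply_bold_and_dots_py := by
  intro text italic _
  unfold Spec_tagline_apply_bold_and_dots_py
  simp only [tagline_apply_bold_and_dots_py, tagline_apply_bold_and_dots_py_alt]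
  have hsplit : PySem.Chars.splitOn text.toList "**".toList = pvParts text.toList := by
    simpa using pvSplit_star text.toList
  have hcount : PySem.Str.count text "**" = pvCnt text.toList := by
    simpa [PySem.Str.count] using pvCount_star text.toList
  rw [hsplit, hcount, pvParts_length]
  have hpar : ((pvCnt text.toList + 1) % 2 == 0) = (pvCnt text.toList % 2 == 1) := by
    rcases Nat.mod_two_eq_zero_or_one (pvCnt text.toList) with h | h <;> simp [Nat.add_mod, h]
  rw [hpar]
  by_cases hodd : (pvCnt text.toList % 2 == 1) = true
  · rw [if_pos hodd, if_pos hodd]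
  · rw [if_neg hodd, if_neg hodd]
    rw [pvAFold_eq italic (pvParts text.toList) 0 [] le_rfl, pvAltScan_eq]
    have h0 : (PySem.Int.mod 0 2 == 1) = false := by decide
    rw [h0]
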